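-- pv_equiv track=rewrite | github.com/djuares/tp1-TDA | problema2/problema_2.py | suma_positivos_final
-- ===== SOURCE A (Python) =====
-- def suma_positivos_final(arr):
--     resultados = {}
--     suma = 0
--
--     for i in range(len(arr)):
--         resultados[i] = 0
--         suma = 0
--         max = float("-inf")
--         for j in range(i + 1, len(arr)):
--             suma += arr[j]
--             if suma > max:
--                 max = suma
--         resultados[i] = max
--
--     resultados[len(arr)-1] = 0
--     return resultados
-- ===== SOURCE B (Python) =====
-- def suma_positivos_final(arr):
--     # Reverse DP: m = max prefix-sum of the suffix starting at the current position.
--     n = len(arr)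
--     if n == 0:
--         return {}
--     res = [0]
--     m = arr[-1]
--     for x in reversed(arr[:-1]):
--         res.append(m)
--         m = x + max(0, m)
--     res.reverse()
--     return dict(enumerate(res))
-- ===== Notes on version B (the rewrite author's own statement) =====
-- stated objective: faster
-- what changed: A rescans the whole suffix after each index (nested loops); B computes all answers in one right-to-left DP pass with m = value + max(0, m), building the result list backwards.
-- intended difference: On the empty list A returns {-1: 0} (its trailing write resultados[len(arr)-1]=0 creates key -1), while B returns the intended empty dict {}. — e.g. on suma_positivos_final([]): A returns [(-1, 0)], B returns []
import Mathlib
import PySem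

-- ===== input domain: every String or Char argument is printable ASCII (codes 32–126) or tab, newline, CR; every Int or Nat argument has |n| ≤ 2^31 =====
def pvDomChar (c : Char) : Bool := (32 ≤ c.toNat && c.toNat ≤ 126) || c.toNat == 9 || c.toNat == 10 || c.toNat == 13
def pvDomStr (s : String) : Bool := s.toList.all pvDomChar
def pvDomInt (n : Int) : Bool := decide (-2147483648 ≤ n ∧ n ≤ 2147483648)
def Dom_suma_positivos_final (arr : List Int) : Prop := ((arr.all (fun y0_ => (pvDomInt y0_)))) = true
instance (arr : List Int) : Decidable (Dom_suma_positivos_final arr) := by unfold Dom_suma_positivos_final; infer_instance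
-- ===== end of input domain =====

-- B replaces A's quadratic per-index rescan by a single right-to-left DP pass (O(n) vs O(n^2));
-- on the empty list A returns {-1: 0} (a leftover write to key -1) while B returns {} — stated as D_ below.

-- ===== PORT A =====
-- inner loop body: suma += arr[j]; if suma > max: max = suma
-- (float('-inf') is modeled as none: every int compares greater than it, exact on int inputs)
def pvInnerA (arr : List Int) (st : Int × Option Int) (j : Int) : Int × Option Int :=
  let suma := st.1 + PySem.List.pyGetD arr j 0
  match st.2 with
  | none => (suma, some suma)
  | some m => if m < suma then (suma, some suma) else (suma, st.2)

-- outer loop body: resultados[i] = 0; suma = 0; max = -inf; inner loop; resultados[i] = max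
-- (the 'none' placeholder 0 is stored only at i = len(arr)-1, where the final write overwrites it with 0)
def pvOuterA (arr : List Int) (d : PySem.Dict Int Int) (i : Int) : PySem.Dict Int Int :=
  let d := d.insert i 0
  let st := (PySem.List.pyRange (i + 1) (arr.length : Int) 1).foldl (pvInnerA arr) (0, none)
  d.insert i (st.2.getD 0)

def suma_positivos_final (arr : List Int) : List (Int × Int) :=
  (((PySem.List.pyRange 0 (arr.length : Int) 1).foldl (pvOuterA arr)
      PySem.Dict.empty).insert ((arr.length : Int) - 1) 0).items

-- ===== PORT B =====
-- loop body: res.append(m); m = x + max(0, m)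
def pvStepB (st : List Int × Int) (x : Int) : List Int × Int :=
  (st.1 ++ [st.2], x + max 0 st.2)

def suma_positivos_final_alt (arr : List Int) : List (Int × Int) :=
  if arr.length = 0 then []
  else
    let st := ((PySem.List.slice arr none (some (-1))).reverse).foldl pvStepB
      ([0], PySem.List.pyGetD arr (-1) 0)
    -- dict(enumerate(res)): the keys 0..n-1 are distinct, so the dict's items are exactly enumerate(res)
    PySem.List.enumerate st.1.reverse 0

-- ===== PRECONDITION & SPEC =====
-- On the empty list A returns {-1: 0} (its trailing 'resultados[len(arr)-1] = 0' writes key -1),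
-- while B returns the intended empty dict {}.
def D_suma_positivos_final (arr : List Int) : Prop := arr = []
instance (arr : List Int) : Decidable (D_suma_positivos_final arr) := by
  unfold D_suma_positivos_final; infer_instance

def Spec_suma_positivos_final (arr : List Int) (out : List (Int × Int)) : Prop :=
  ¬ D_suma_positivos_final arr → out = suma_positivos_final_alt arr
instance (arr : List Int) (out : List (Int × Int)) : Decidable (Spec_suma_positivos_final arr out) := by
  unfold Spec_suma_positivos_final; infer_instance

def pvDiffWitness_suma_positivos_final : List Int := []
def pvDiffWitnessOut_suma_positivos_final : (List (Int × Int)) × (List (Int × Int)) :=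
  ([(-1, 0)], [])

-- ===== CLAIM (what is proved, stated in full; the proofs are below) =====
def Claim_unchanged_suma_positivos_final : Prop :=
  ∀ (arr : List Int), Dom_suma_positivos_final arr →
    Spec_suma_positivos_final arr (suma_positivos_final arr)
def Claim_changed_suma_positivos_final : Prop :=
  Dom_suma_positivos_final (pvDiffWitness_suma_positivos_final) ∧
  D_suma_positivos_final (pvDiffWitness_suma_positivos_final) ∧
  suma_positivos_final (pvDiffWitness_suma_positivos_final) = pvDiffWitnessOut_suma_positivos_final.1 ∧
  suma_positivos_final_alt (pvDiffWitness_suma_positivos_final) = pvDiffWitnessOut_suma_positivos_final.2 ∧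
  pvDiffWitnessOut_suma_positivos_final.1 ≠ pvDiffWitnessOut_suma_positivos_final.2
def Claim_exact_suma_positivos_final : Prop :=
  ∀ (arr : List Int), Dom_suma_positivos_final arr → D_suma_positivos_final arr →
    suma_positivos_final arr ≠ suma_positivos_final_alt arr

-- ===== LEMMAS AND PROOFS =====

-- max(0, best prefix sum of l) (0 also covers the empty prefix / empty l)
def pvQ : List Int → Int
  | [] => 0
  | x :: xs => max 0 (x + pvQ xs)

-- best (maximal) nonempty prefix sum of l (0 on [] — never used there)
def pvM : List Int → Int
  | [] => 0
  | x :: xs => x + pvQ xs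

-- the intended result values: entry i is pvM of the suffix after position i, last entry 0
def pvR : List Int → List Int
  | [] => []
  | [_] => [0]
  | _ :: y :: ys => pvM (y :: ys) :: pvR (y :: ys)

-- element-wise version of A's inner step
def pvStepE (st : Int × Option Int) (x : Int) : Int × Option Int :=
  let suma := st.1 + x
  match st.2 with
  | none => (suma, some suma)
  | some m => if m < suma then (suma, some suma) else (suma, st.2)

lemma pvR_length : ∀ (arr : List Int), (pvR arr).length = arr.length := by
  intro arr
  induction arr using pvR.induct with
  | case1 => rfl
  | case2 x => rfl
  | case3 x y ys ih => simp [pvR, ih]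

lemma pvR_getElem : ∀ (arr : List Int) (k : Nat) (hk : k < arr.length),
    (pvR arr)[k]'(by rw [pvR_length]; exact hk) =
      if k = arr.length - 1 then 0 else pvM (arr.drop (k + 1)) := by
  intro arr
  induction arr using pvR.induct with
  | case1 => intro k hk; simp at hk
  | case2 x =>
    intro k hk
    have hk0 : k = 0 := by simpa using hk
    subst hk0; simp [pvR]
  | case3 x y ys ih =>
    intro k hk
    cases k with
    | zero => simp [pvR]
    | succ j =>
      have hj : j < (y :: ys).length := by simpa using hk
      have hih := ih j hj
      simp only [pvR, List.getElem_cons_succ, hih, List.length_cons, List.drop_succ_cons]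
      split_ifs <;> first | rfl | omega

-- A's inner index loop equals the element-wise fold over the corresponding suffix
lemma pvInner_eq_elem : ∀ (t : List Int) (arr : List Int) (a : Int) (st : Int × Option Int),
    0 ≤ a → arr.drop a.toNat = t →
    (PySem.List.pyRange a (arr.length : Int) 1).foldl (pvInnerA arr) st = t.foldl pvStepE st := by
  intro t
  induction t with
  | nil =>
    intro arr a st ha hdrop
    have hlen : arr.length ≤ a.toNat := by
      rwa [List.drop_eq_nil_iff] at hdrop
    rw [PySem.List.pyRange_one_eq_nil (by omega)]
    rfl
  | cons x rest ih =>
    intro arr a st ha hdrop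
    have hlt : a.toNat < arr.length := by
      by_contra hge
      rw [List.drop_eq_nil_iff.2 (by omega)] at hdrop
      exact (List.cons_ne_nil x rest) hdrop.symm
    have hget : arr[a.toNat]'hlt = x := by
      have h0 : (arr.drop a.toNat)[0]'(by rw [hdrop]; simp) = x := by simp [hdrop]
      simpa using h0
    have hpg : PySem.List.pyGetD arr a 0 = x := by
      rw [PySem.List.pyGetD_eq_getElem arr 0 ha (by omega), hget]
    rw [PySem.List.pyRange_one_cons (by omega), List.foldl_cons]
    have hstep : pvInnerA arr st a = pvStepE st x := by
      simp only [pvInnerA, pvStepE, hpg]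
    rw [hstep]
    apply ih arr (a + 1) (pvStepE st x) (by omega)
    rw [show (a + 1).toNat = a.toNat + 1 by omega, ← List.tail_drop, hdrop]
    rfl

lemma pvFoldE_some : ∀ (t : List Int) (s c : Int),
    (t.foldl pvStepE (s, some c)).2 = some (if t = [] then c else max c (s + pvM t)) := by
  intro t
  induction t with
  | nil => intro s c; rfl
  | cons x rest ih =>
    intro s c
    have hstep : pvStepE (s, some c) x = (s + x, some (max c (s + x))) := by
      simp only [pvStepE]
      split_ifs with h
      · simp [max_eq_right (le_of_lt h)]
      · simp [max_eq_left (not_lt.1 h)]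
    rw [List.foldl_cons, hstep, ih]
    cases rest with
    | nil => simp [pvM, pvQ]
    | cons y ys =>
      have hq : pvQ (y :: ys) = max 0 (pvM (y :: ys)) := by simp [pvQ, pvM]
      simp only [pvM, hq]
      congr 1
      simp only [List.cons_ne_nil, reduceIte]
      omega

lemma pvFoldE_none : ∀ (t : List Int) (s : Int), t ≠ [] →
    (t.foldl pvStepE (s, none)).2 = some (s + pvM t) := by
  intro t s ht
  cases t with
  | nil => exact absurd rfl ht
  | cons x rest =>
    have hstep : pvStepE (s, none) x = (s + x, some (s + x)) := rfl
    rw [List.foldl_cons, hstep, pvFoldE_some]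
    cases rest with
    | nil => simp [pvM, pvQ]
    | cons y ys =>
      have hq : pvQ (y :: ys) = max 0 (pvM (y :: ys)) := by simp [pvQ, pvM]
      simp only [pvM, hq, List.cons_ne_nil, reduceIte]
      congr 1
      omega

-- the value A stores at index i
def pvGA (arr : List Int) (i : Int) : Int :=
  (((PySem.List.pyRange (i + 1) (arr.length : Int) 1).foldl (pvInnerA arr) (0, none)).2).getD 0

lemma pvGA_eq (arr : List Int) (k : Nat) (hk : k + 1 < arr.length) :
    pvGA arr (k : Int) = pvM (arr.drop (k + 1)) := by
  have hne : arr.drop (k + 1) ≠ [] := by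
    rw [← List.length_pos_iff, List.length_drop]; omega
  have he := pvInner_eq_elem (arr.drop (k + 1)) arr ((k : Int) + 1) (0, none) (by omega)
    (by norm_num)
  rw [pvGA, he, pvFoldE_none _ _ hne]
  simp

lemma pvOuter_items (arr : List Int) : ∀ (k : Nat),
    (((List.range k).map (fun (j : Nat) => (j : Int))).foldl (pvOuterA arr) PySem.Dict.empty).items
      = (List.range k).map (fun (j : Nat) => ((j : Int), pvGA arr (j : Int))) := by
  intro k
  induction k with
  | zero => rfl
  | succ k ih =>
    rw [List.range_succ, List.map_append, List.foldl_append, List.map_append]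
    simp only [List.map_cons, List.map_nil, List.foldl_cons, List.foldl_nil]
    set d := ((List.range k).map (fun (j : Nat) => (j : Int))).foldl (pvOuterA arr)
      PySem.Dict.empty with hd
    have hkeys : d.keys = (List.range k).map (fun (j : Nat) => (j : Int)) := by
      have h1 : d.keys = d.items.map (·.1) := rfl
      rw [h1, ih, List.map_map]
      rfl
    have hnc : d.contains (k : Int) = false := by
      rw [PySem.Dict.contains_eq_decide_mem_keys, hkeys]
      simp only [decide_eq_false_iff_not, List.mem_map, List.mem_range]
      rintro ⟨j, hj, hcast⟩
      omega
    have hunfold : pvOuterA arr d (k : Int)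
        = (d.insert (k : Int) 0).insert (k : Int) (pvGA arr (k : Int)) := rfl
    rw [hunfold,
      PySem.Dict.items_insert_of_contains _ _
        (by rw [PySem.Dict.contains_insert]; simp),
      PySem.Dict.items_insert_of_not_contains _ _ hnc, ih,
      List.map_append, List.map_map]
    congr 1
    · apply List.map_congr_left
      intro j hj
      simp only [List.mem_range] at hj
      simp
      intro hjk
      subst hjk
      exact ⟨rfl, rfl⟩
    · simp

-- A's result, in closed form (nonempty input)
lemma pvA_items (arr : List Int) (h : arr ≠ []) :
    suma_positivos_final arr =
      (List.range arr.length).map (fun (j : Nat) =>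
        if j = arr.length - 1 then (((arr.length : Int) - 1), (0 : Int))
        else ((j : Int), pvM (arr.drop (j + 1)))) := by
  have hn : 0 < arr.length := List.length_pos_iff.2 h
  rw [suma_positivos_final, PySem.List.pyRange_zero_nat]
  have hitems := pvOuter_items arr arr.length
  set d := ((List.range arr.length).map (fun (j : Nat) => (j : Int))).foldl (pvOuterA arr)
    PySem.Dict.empty with hd
  have hkeys : d.keys = (List.range arr.length).map (fun (j : Nat) => (j : Int)) := by
    have h1 : d.keys = d.items.map (·.1) := rfl
    rw [h1, hitems, List.map_map]
    rfl
  have hc : d.contains ((arr.length : Int) - 1) = true := by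
    rw [PySem.Dict.contains_eq_decide_mem_keys, hkeys]
    simp only [decide_eq_true_eq, List.mem_map, List.mem_range]
    exact ⟨arr.length - 1, by omega, by omega⟩
  rw [PySem.Dict.items_insert_of_contains _ _ hc, hitems, List.map_map]
  apply List.map_congr_left
  intro j hj
  simp only [List.mem_range] at hj
  by_cases hje : j = arr.length - 1
  · simp [hje]
    intro hno
    exact absurd (by omega) hno
  · simp [hje, pvGA_eq arr j (by omega)]
    intro hx
    exfalso
    omega

-- B's backward fold computes pvR reversed together with the running pvM
lemma pvFoldB : ∀ (arr : List Int) (h : arr ≠ []),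
    arr.dropLast.reverse.foldl pvStepB ([0], arr.getLast h) = ((pvR arr).reverse, pvM arr) := by
  intro arr
  induction arr using pvR.induct with
  | case1 => intro h; exact absurd rfl h
  | case2 x => intro h; simp [pvR, pvM, pvQ]
  | case3 x y ys ih =>
    intro h
    have hne : (y :: ys) ≠ [] := List.cons_ne_nil _ _
    have hdl : (x :: y :: ys).dropLast = x :: (y :: ys).dropLast := rfl
    have hgl : (x :: y :: ys).getLast h = (y :: ys).getLast hne := by
      simp [List.getLast_cons]
    rw [hdl, hgl, List.reverse_cons, List.foldl_append, ih hne]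
    simp only [List.foldl_cons, List.foldl_nil, pvStepB]
    rw [show pvR (x :: y :: ys) = pvM (y :: ys) :: pvR (y :: ys) from rfl, List.reverse_cons]
    simp [pvM, pvQ]

-- B's result, in closed form (nonempty input)
lemma pvB_items (arr : List Int) (h : arr ≠ []) :
    suma_positivos_final_alt arr = PySem.List.enumerate (pvR arr) 0 := by
  have hn : ¬ arr.length = 0 := fun he => h (List.length_eq_zero_iff.mp he)
  have hlast : PySem.List.pyGetD arr (-1) 0 = arr.getLast h := PySem.List.pyGetD_neg_one arr 0 h
  rw [suma_positivos_final_alt, if_neg hn]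
  simp only [PySem.List.slice_to_neg_one, hlast, pvFoldB arr h, List.reverse_reverse]

theorem suma_positivos_final_spec : Claim_unchanged_suma_positivos_final := by
  intro arr _ hD
  have h : arr ≠ [] := hD
  show suma_positivos_final arr = suma_positivos_final_alt arr
  rw [pvA_items arr h, pvB_items arr h]
  apply List.ext_getElem
  · rw [List.length_map, List.length_range, PySem.List.length_enumerate, pvR_length]
  · intro k hk1 hk2
    simp only [List.length_map, List.length_range] at hk1
    rw [List.getElem_map, List.getElem_range, PySem.List.getElem_enumerate]
    rw [pvR_getElem arr k hk1]
    by_cases hke : k = arr.length - 1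
    · rw [if_pos hke, if_pos hke]
      simp only [Prod.mk.injEq]
      exact ⟨by omega, trivial⟩
    · rw [if_neg hke, if_neg hke]
      simp only [Prod.mk.injEq]
      exact ⟨by omega, trivial⟩

theorem suma_positivos_final_changed : Claim_changed_suma_positivos_final := by
  unfold Claim_changed_suma_positivos_final; decide

theorem suma_positivos_final_tight : Claim_exact_suma_positivos_final := by
  intro arr _ hD
  subst hD
  decide
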